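-- pv_equiv track=rewrite | github.com/gitsoep/tourney | backend/app/services/bracket_service.py | _bracket_seeding_slots
-- ===== SOURCE A (Python) =====
-- from typing import List, Optional, Dict
--
-- def _bracket_seeding_slots(n: int) -> List[int]:
--     """
--     Generate standard bracket seeding positions for n slots (power of 2).
--     Seed 1 plays seed n, seed 2 plays seed n-1, etc., arranged so top seeds
--     are on opposite sides of the bracket.
--
--     Returns a list of seed indices (0-based) in match order:
--     match 0 gets slots[0] vs slots[1], match 1 gets slots[2] vs slots[3], etc.
--     """
--     if n == 1:
--         return [0]
--     if n == 2:
--         return [0, 1]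
--
--     # Recursively build the bracket
--     half = _bracket_seeding_slots(n // 2)
--     result = []
--     for seed in half:
--         result.append(seed)
--         result.append(n - 1 - seed)
--     return result
-- ===== SOURCE B (Python) =====
-- def _bracket_seeding_slots(n: int):
--     # Iterative version: record the descent sizes, then rebuild bottom-up.
--     levels = []
--     size = n
--     while size > 2:
--         levels.append(size)
--         size //= 2
--     seeds = [0] if size == 1 else [0, 1]
--     for m in reversed(levels):
--         nxt = []
--         for s in seeds:
--             nxt.append(s)
--             nxt.append(m - 1 - s)
--         seeds = nxt
--     return seeds
-- ===== Notes on version B (the rewrite author's own statement) =====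
-- stated objective: alternative
-- what changed: Replaces the top-down recursion with two iterative passes: record each descent size in a list, then rebuild the seeding bottom-up by folding the recorded sizes in reverse.
-- outside the precondition, e.g. on _bracket_seeding_slots(0): A raises RecursionError, B returns [0, 1]
import Mathlib
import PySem

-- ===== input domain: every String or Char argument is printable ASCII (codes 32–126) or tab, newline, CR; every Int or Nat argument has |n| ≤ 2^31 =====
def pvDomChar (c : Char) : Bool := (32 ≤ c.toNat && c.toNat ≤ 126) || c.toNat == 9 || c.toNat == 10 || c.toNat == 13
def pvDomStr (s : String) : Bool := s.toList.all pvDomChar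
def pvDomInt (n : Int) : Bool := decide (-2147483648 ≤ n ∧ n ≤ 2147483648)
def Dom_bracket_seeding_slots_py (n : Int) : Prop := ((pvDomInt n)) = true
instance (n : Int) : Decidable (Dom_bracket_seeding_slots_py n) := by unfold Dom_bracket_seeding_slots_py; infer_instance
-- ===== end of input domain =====

-- B replaces A's recursion by an iterative descent pass plus a bottom-up rebuild (objective: alternative).

-- ===== PORT A =====
-- fuel makes the recursion total; n.toNat + 1 fuel always suffices for n ≥ 1
def bracketAuxA : Nat → Int → List Int
  | 0, _ => []
  | fuel + 1, n =>
    if n = 1 then [0]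
    else if n = 2 then [0, 1]
    else
      let half := bracketAuxA fuel (PySem.Int.floordiv n 2)
      half.foldl (fun acc seed => acc ++ [seed, n - 1 - seed]) []

def bracket_seeding_slots_py (n : Int) : List Int := bracketAuxA (n.toNat + 1) n

-- ===== PORT B =====
-- the 'while size > 2' descent: returns (levels in append order, final size); fueled for totality
def levelsB : Nat → Int → List Int × Int
  | 0, size => ([], size)
  | fuel + 1, size =>
    if 2 < size then
      let r := levelsB fuel (PySem.Int.floordiv size 2)
      (size :: r.1, r.2)
    else ([], size)

-- one rebuild step: for each seed s, append s and m-1-s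
def expandB (m : Int) (seeds : List Int) : List Int :=
  seeds.foldl (fun acc s => acc ++ [s, m - 1 - s]) []

def bracket_seeding_slots_py_alt (n : Int) : List Int :=
  let r := levelsB (n.toNat + 1) n
  let base := if r.2 = 1 then [0] else [0, 1]
  r.1.reverse.foldl (fun seeds m => expandB m seeds) base

-- ===== PRECONDITION & SPEC =====
-- Pre_ excludes n ≤ 0, on which Python A recurses without progress and raises RecursionError.
def Pre_bracket_seeding_slots_py (n : Int) : Prop := 1 ≤ n
instance (n : Int) : Decidable (Pre_bracket_seeding_slots_py n) := by unfold Pre_bracket_seeding_slots_py; infer_instance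
def pvWitness_bracket_seeding_slots_py : Int := 8

def Spec_bracket_seeding_slots_py (n : Int) (out : List Int) : Prop := out = bracket_seeding_slots_py_alt n
instance (n : Int) (out : List Int) : Decidable (Spec_bracket_seeding_slots_py n out) := by unfold Spec_bracket_seeding_slots_py; infer_instance

-- ===== CLAIM (what is proved, stated in full; the proofs are below) =====
def Claim_equal_bracket_seeding_slots_py : Prop := ∀ (n : Int), Dom_bracket_seeding_slots_py n → Pre_bracket_seeding_slots_py n → Spec_bracket_seeding_slots_py n (bracket_seeding_slots_py n)

-- ===== LEMMAS AND PROOFS =====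

theorem floordiv_two_toNat_lt {n : Int} (h : 3 ≤ n) :
    (PySem.Int.floordiv n 2).toNat < n.toNat := by
  rw [PySem.Int.floordiv_eq_ediv_of_pos (by omega)]
  omega

theorem floordiv_two_pos {n : Int} (h : 3 ≤ n) : 1 ≤ PySem.Int.floordiv n 2 := by
  rw [PySem.Int.floordiv_eq_ediv_of_pos (by omega)]
  omega

-- the descent pass is fuel-independent once fuel exceeds n.toNat
theorem levelsB_fuel : ∀ (f g : Nat) (n : Int), n.toNat < f → n.toNat < g →
    levelsB f n = levelsB g n := by
  intro f
  induction f with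
  | zero => intro g n hf; omega
  | succ f ih =>
    intro g n hf hg
    cases g with
    | zero => omega
    | succ g =>
      simp only [levelsB]
      by_cases h : 2 < n
      · have h3 : 3 ≤ n := by omega
        rw [ih g _ (by have := floordiv_two_toNat_lt h3; omega)
            (by have := floordiv_two_toNat_lt h3; omega)]
      · simp [h]

-- B's recurrence: for n ≥ 3, B n = expandB n (B (n // 2))
theorem alt_rec {n : Int} (h : 3 ≤ n) :
    bracket_seeding_slots_py_alt n =
      expandB n (bracket_seeding_slots_py_alt (PySem.Int.floordiv n 2)) := by
  have hlt := floordiv_two_toNat_lt h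
  unfold bracket_seeding_slots_py_alt
  simp only [levelsB, if_pos (show 2 < n by omega)]
  rw [levelsB_fuel n.toNat ((PySem.Int.floordiv n 2).toNat + 1) _ (by omega) (by omega)]
  simp only [levelsB]
  simp [List.foldl_append]

theorem aux_eq_alt : ∀ (f : Nat) (n : Int), 1 ≤ n → n.toNat < f →
    bracketAuxA f n = bracket_seeding_slots_py_alt n := by
  intro f
  induction f with
  | zero => intro n h1 hf; omega
  | succ f ih =>
    intro n h1 hf
    simp only [bracketAuxA]
    by_cases e1 : n = 1
    · subst e1; rw [if_pos rfl]; decide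
    · by_cases e2 : n = 2
      · subst e2; rw [if_neg (by decide), if_pos rfl]; decide
      · have h3 : 3 ≤ n := by omega
        rw [if_neg e1, if_neg e2,
            ih (PySem.Int.floordiv n 2) (floordiv_two_pos h3)
              (by have := floordiv_two_toNat_lt h3; omega),
            alt_rec h3]
        rfl

-- ===== VERDICT (by name: the statement is the Claim_ definition above) =====
theorem bracket_seeding_slots_py_spec : Claim_equal_bracket_seeding_slots_py := by
  intro n _ hpre
  unfold Spec_bracket_seeding_slots_py bracket_seeding_slots_py
  exact aux_eq_alt (n.toNat + 1) n hpre (by omega)
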